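-- pv_equiv track=rewrite | github.com/ThreatByte/ISSCTF2024 | CRYPTOGRAPHY/06- Rotveiller/solve.py | encrypt_string
-- ===== SOURCE A (Python) =====
-- def rotate_char(char, shift):
--     if '!' <= char <= '~':
--         return chr(((ord(char) - ord('!') + shift) % 94) + ord('!'))
--     else:
--         return char
--
-- def encrypt_string(input_string):
--     encrypted_string = ""
--     for i in range(len(input_string)):
--         if i % 2 == 0:
--             encrypted_char = rotate_char(input_string[i], 1)
--         else:
--             encrypted_char = rotate_char(input_string[i], 47)
--         encrypted_string += encrypted_char
--     return encrypted_string
-- ===== SOURCE B (Python) =====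
-- # Bulk re-implementation: parity-split via slicing, two str.translate passes over
-- # rotated-alphabet tables built with str.maketrans (no per-char arithmetic), then
-- # a slice-assignment interleave back into one string.
-- _AL = ''.join(chr(c) for c in range(33, 127))
-- _T1 = str.maketrans(_AL, _AL[1:] + _AL[:1])
-- _T47 = str.maketrans(_AL, _AL[47:] + _AL[:47])
--
-- def encrypt_string(input_string):
--     evens = input_string[::2].translate(_T1)
--     odds = input_string[1::2].translate(_T47)
--     out = [''] * len(input_string)
--     out[0::2] = evens
--     out[1::2] = odds
--     return ''.join(out)
-- ===== Notes on version B (the rewrite author's own statement) =====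
-- stated objective: faster
-- what changed: Instead of A's single indexed loop applying per-character modular arithmetic with a parity test, B splits the string by parity with slicing, transforms each half in one bulk str.translate pass over rotated-alphabet maketrans tables (no arithmetic per character), and interleaves the two halves back with slice assignment.
import Mathlib
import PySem

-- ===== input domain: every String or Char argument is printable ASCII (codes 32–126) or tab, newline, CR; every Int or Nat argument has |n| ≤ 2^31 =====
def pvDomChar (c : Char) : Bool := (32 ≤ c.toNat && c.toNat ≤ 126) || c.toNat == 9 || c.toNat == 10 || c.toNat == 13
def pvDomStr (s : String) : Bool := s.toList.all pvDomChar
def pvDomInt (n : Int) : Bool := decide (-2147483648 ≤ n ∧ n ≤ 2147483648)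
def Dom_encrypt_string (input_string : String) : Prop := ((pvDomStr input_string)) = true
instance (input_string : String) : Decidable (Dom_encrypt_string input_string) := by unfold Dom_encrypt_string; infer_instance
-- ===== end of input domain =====

-- B replaces A's per-character modular arithmetic in an indexed loop by a parity split via
-- slicing, two bulk translate passes over rotated-alphabet maketrans tables, and an
-- interleave (objective: faster, measured).

-- ===== PORT A =====
def rotate_char (char : Char) (shift : Int) : Char :=
  if '!' ≤ char ∧ char ≤ '~' then
    Char.ofNat (PySem.Int.mod ((char.toNat : Int) - 33 + shift) 94 + 33).toNat
  else char

-- 'encrypted_string += encrypted_char' accumulated as a char list, converted once at the end (exact)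
def encrypt_string (input_string : String) : String :=
  String.ofList ((PySem.List.pyRange 0 (input_string.toList.length : Int) 1).foldl
    (fun acc i =>
      acc ++ [if PySem.Int.mod i 2 = 0
              then rotate_char (PySem.List.pyGetD input_string.toList i ' ') 1
              else rotate_char (PySem.List.pyGetD input_string.toList i ' ') 47]) [])

-- ===== PORT B =====
-- _AL = ''.join(chr(c) for c in range(33, 127))
def pvAL : List Char := (PySem.List.pyRange 33 127 1).map (fun c => Char.ofNat c.toNat)
-- str.maketrans(src, dst) is dict(zip(src, dst)) on code points; code points ↔ chars bijectively,
-- so the Dict Char Char below is an exact port of the table.  dst = _AL[1:] + _AL[:1] etc.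
def pvT1 : PySem.Dict Char Char :=
  PySem.Dict.ofList (pvAL.zip (PySem.List.slice pvAL (some 1) none ++ PySem.List.slice pvAL none (some 1)))
def pvT47 : PySem.Dict Char Char :=
  PySem.Dict.ofList (pvAL.zip (PySem.List.slice pvAL (some 47) none ++ PySem.List.slice pvAL none (some 47)))

-- str.translate on a maketrans table: chars with an entry are replaced, others pass through (exact)
def pvTrans (t : PySem.Dict Char Char) (c : Char) : Char := (PySem.Dict.get? t c).getD c

-- out = ['']*len(s); out[0::2] = evens; out[1::2] = odds; ''.join(out) — the slice assignments
-- interleave the two halves; exact port since len evens = len odds or len odds + 1 here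
def pvWeave {α : Type} : List α → List α → List α
  | [], _ => []
  | a :: e, o => a :: pvWeave o e
  termination_by l₁ l₂ => l₁.length + l₂.length
  decreasing_by simp; omega

def encrypt_string_alt (input_string : String) : String :=
  let evens := ((PySem.List.slice? input_string.toList none none 2).getD []).map (pvTrans pvT1)
  let odds := ((PySem.List.slice? input_string.toList (some 1) none 2).getD []).map (pvTrans pvT47)
  String.ofList (pvWeave evens odds)

-- ===== PRECONDITION & SPEC =====
def Spec_encrypt_string (input_string : String) (out : String) : Prop := out = encrypt_string_alt input_string
instance (input_string : String) (out : String) : Decidable (Spec_encrypt_string input_string out) := by unfold Spec_encrypt_string; infer_instance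

-- ===== CLAIM (what is proved, stated in full; the proofs are below) =====
def Claim_equal_encrypt_string : Prop := ∀ (input_string : String), Dom_encrypt_string input_string → Spec_encrypt_string input_string (encrypt_string input_string)

-- ===== LEMMAS AND PROOFS =====

-- the per-index rotation A's loop produces, in A's branch order
def pvG (l : List Char) (i : Int) : Char :=
  if PySem.Int.mod i 2 = 0 then rotate_char (PySem.List.pyGetD l i ' ') 1
  else rotate_char (PySem.List.pyGetD l i ' ') 47

-- both sides two characters at a time
def pvPairsR : List Char → List Char
  | [] => []
  | [a] => [rotate_char a 1]
  | a :: b :: t => rotate_char a 1 :: rotate_char b 47 :: pvPairsR t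

-- every other element starting at the head (what xs[::2] selects)
def pvEvens {α : Type} : List α → List α
  | [] => []
  | [a] => [a]
  | a :: _ :: t => a :: pvEvens t

-- ---- A's loop = pvPairsR ----

lemma pvG_zero (a : Char) (t : List Char) : pvG (a :: t) 0 = rotate_char a 1 := by
  simp [pvG, PySem.Int.mod, PySem.List.pyGetD_zero_cons]

lemma pvG_one (a b : Char) (t : List Char) : pvG (a :: b :: t) 1 = rotate_char b 47 := by
  simp [pvG, PySem.Int.mod, PySem.List.pyGetD]

lemma pv_mod2 (i : Int) : PySem.Int.mod (i + 2) 2 = PySem.Int.mod i 2 := by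
  simp [PySem.Int.mod, Int.fmod_eq_emod]

lemma pvG_shift (a b : Char) (t : List Char) (k : Nat) :
    pvG (a :: b :: t) ((k : Int) + 2) = pvG t k := by
  unfold pvG
  rw [pv_mod2]
  have hidx : ((k : Int) + 2) = (((k + 2 : Nat)) : Int) := by push_cast; ring
  rw [hidx, PySem.List.pyGetD_natCast, PySem.List.pyGetD_natCast]
  simp [List.getD]

lemma pv_main (l : List Char) :
    (List.range l.length).map (fun k : Nat => pvG l (k : Int)) = pvPairsR l := by
  induction l using pvPairsR.induct with
  | case1 => simp [pvPairsR]
  | case2 a => simp [pvPairsR]; simpa using pvG_zero a []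
  | case3 a b t ih =>
      show (List.range (t.length + 1 + 1)).map (fun k : Nat => pvG (a :: b :: t) (k : Int)) = _
      rw [List.range_succ_eq_map, List.range_succ_eq_map, pvPairsR]
      simp only [List.map_cons, List.map_map]
      rw [← ih]
      refine congrArg₂ _ (by simpa using pvG_zero a (b :: t)) (congrArg₂ _ (by simpa using pvG_one a b t) ?_)
      apply List.map_congr_left
      intro k _
      have h2 : ((k.succ.succ : Nat) : Int) = (k : Int) + 2 := by push_cast; ring
      calc pvG (a :: b :: t) ((k.succ.succ : Nat) : Int)
          = pvG (a :: b :: t) ((k : Int) + 2) := by rw [h2]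
        _ = pvG t k := pvG_shift a b t k

lemma pv_map_range (l : List Char) :
    (PySem.List.pyRange 0 (l.length : Int) 1).map (pvG l) = (List.range l.length).map (fun k : Nat => pvG l (k : Int)) := by
  rw [PySem.List.pyRange_one]
  have h1 : ((l.length : Int) - 0).toNat = l.length := by omega
  rw [h1, List.map_map]
  apply List.map_congr_left
  intro k _
  simp

-- ---- the two slices ----

lemma pvFilterEvens {α : Type} (xs : List α) :
    (List.range ((xs.length + 1) / 2)).filterMap (fun k => xs[2 * k]?) = pvEvens xs := by
  induction xs using pvEvens.induct with
  | case1 => simp [pvEvens]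
  | case2 a => simp [pvEvens]
  | case3 a b t ih =>
      have hlen : ((a :: b :: t).length + 1) / 2 = (t.length + 1) / 2 + 1 := by
        simp; omega
      rw [hlen, List.range_succ_eq_map, List.filterMap_cons, pvEvens]
      simp only [List.filterMap_map]
      have h : ∀ k : Nat, ((fun k => (a :: b :: t)[2 * k]?) ∘ Nat.succ) k = t[2 * k]? := by
        intro k
        have h2 : 2 * Nat.succ k = (2 * k) + 1 + 1 := by omega
        simp [h2]
      simp only [Function.comp] at h ⊢
      simp only [h]
      simp [ih]

lemma pv_slice_evens {α : Type} (xs : List α) :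
    PySem.List.slice? xs none none 2 = some (pvEvens xs) := by
  simp only [PySem.List.slice?, PySem.List.sliceIndices]
  norm_num
  have hc : (if 0 < xs.length then (((xs.length : Int) + 2 - 1) / 2).toNat else 0)
      = (xs.length + 1) / 2 := by split_ifs with h <;> omega
  rw [hc, ← pvFilterEvens]
  apply List.filterMap_congr
  intro k _
  rw [show ((2 * (k : Int))).toNat = 2 * k from by omega]

lemma pv_slice_odds {α : Type} (xs : List α) :
    PySem.List.slice? xs (some 1) none 2 = some (pvEvens xs.tail) := by
  cases xs with
  | nil => rfl
  | cons a t =>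
      simp only [PySem.List.slice?, PySem.List.sliceIndices]
      norm_num
      have hc : (if 0 < t.length then (((t.length : Int) + 2 - 1) / 2).toNat else 0)
          = (t.length + 1) / 2 := by split_ifs with h <;> omega
      rw [hc, ← pvFilterEvens]
      apply List.filterMap_congr
      intro k _
      have h2 : ((1 + 2 * (k : Int))).toNat = 2 * k + 1 := by omega
      rw [h2]
      simp

-- ---- interleaving the two mapped halves ----

-- the result of B's three bulk passes, two characters at a time
def pvZig (f g : Char → Char) : List Char → List Char
  | [] => []
  | [a] => [f a]
  | a :: b :: t => f a :: g b :: pvZig f g t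

lemma pvWeave_cons {α : Type} (a : α) (e o : List α) :
    pvWeave (a :: e) o = a :: pvWeave o e := by
  simp [pvWeave]

lemma pvWeave_maps (f g : Char → Char) (l : List Char) :
    pvWeave ((pvEvens l).map f) ((pvEvens l.tail).map g) = pvZig f g l := by
  induction l using pvPairsR.induct with
  | case1 => simp [pvEvens, pvWeave, pvZig]
  | case2 a => simp [pvEvens, pvWeave, pvZig, pvWeave_cons]
  | case3 a b t ih =>
      have e1 : pvEvens (a :: b :: t) = a :: pvEvens t := rfl
      have e3 : pvEvens (b :: t) = b :: pvEvens t.tail := by cases t <;> rfl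
      rw [e1, List.tail_cons, e3, List.map_cons, List.map_cons, pvWeave_cons, pvWeave_cons, pvZig]
      rw [ih]

-- ---- the tables agree with rotate_char on every domain character ----

set_option maxRecDepth 10000 in
lemma pvTrans_spec : ∀ n : Nat, n < 127 → pvDomChar (Char.ofNat n) = true →
    pvTrans pvT1 (Char.ofNat n) = rotate_char (Char.ofNat n) 1 ∧
    pvTrans pvT47 (Char.ofNat n) = rotate_char (Char.ofNat n) 47 := by decide

lemma pvTrans_char (c : Char) (h : pvDomChar c = true) :
    pvTrans pvT1 c = rotate_char c 1 ∧ pvTrans pvT47 c = rotate_char c 47 := by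
  have hlt : c.toNat < 127 := by
    simp [pvDomChar] at h
    rcases h with ((⟨h1, h2⟩ | h) | h) | h <;> omega
  have := pvTrans_spec c.toNat hlt (by rwa [Char.ofNat_toNat])
  rwa [Char.ofNat_toNat] at this

lemma pvZig_eq (l : List Char) (h : l.all pvDomChar = true) :
    pvZig (pvTrans pvT1) (pvTrans pvT47) l = pvPairsR l := by
  induction l using pvPairsR.induct with
  | case1 => rfl
  | case2 a =>
      simp at h
      simp [pvZig, pvPairsR, (pvTrans_char a h).1]
  | case3 a b t ih =>
      simp at h
      obtain ⟨ha, hb, ht⟩ := h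
      rw [pvZig, pvPairsR, (pvTrans_char a ha).1, (pvTrans_char b hb).2, ih (by simpa using ht)]

-- ===== VERDICT (by name: the statement is the Claim_ definition above) =====
theorem encrypt_string_spec : Claim_equal_encrypt_string := by
  intro s hDom
  unfold Spec_encrypt_string encrypt_string encrypt_string_alt
  rw [pv_slice_evens, pv_slice_odds]
  show String.ofList ((PySem.List.pyRange 0 (s.toList.length : Int) 1).foldl
      (fun acc i => acc ++ [pvG s.toList i]) []) =
    String.ofList (pvWeave ((pvEvens s.toList).map (pvTrans pvT1))
      ((pvEvens s.toList.tail).map (pvTrans pvT47)))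
  rw [PySem.List.foldl_append_singleton_eq_map (pvG s.toList), List.nil_append,
      pv_map_range, pv_main, pvWeave_maps, pvZig_eq]
  exact hDom
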